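-- pv_equiv track=rewrite | github.com/equan06/aoc | 2019/day4.py | has_repeats_special
-- ===== SOURCE A (Python) =====
-- def has_repeats_special(num):
--     """This is ugly but gets the job done. Counts the length of each run of digits, and breaks early if length 2 run is found."""
--     num_str = str(num)
--     num_consec = 1
--     prev = ""
--     for i in range(len(num_str)):
--         if num_str[i] == prev:
--             num_consec += 1
--         else:
--             if num_consec == 2:
--                 return True
--             num_consec = 1
--         prev = num_str[i]
--     return num_consec == 2
-- ===== SOURCE B (Python) =====
-- def has_repeats_special(num):
--     """Materialize the maximal digit runs of str(num) as (char, length) pairs,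
--     then test whether any run has length exactly 2 (no early break, no prev state)."""
--     s = str(num)
--     runs = []
--     for ch in s:
--         if runs and runs[-1][0] == ch:
--             runs[-1][1] += 1
--         else:
--             runs.append([ch, 1])
--     return any(n == 2 for _, n in runs)
-- ===== Notes on version B (the rewrite author's own statement) =====
-- stated objective: alternative
-- what changed: B materializes the run-length encoding of str(num) in one pass and then tests the group lengths in a second pass, instead of A's single scan with prev/num_consec state, early return and a trailing-run check.
import Mathlib
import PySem

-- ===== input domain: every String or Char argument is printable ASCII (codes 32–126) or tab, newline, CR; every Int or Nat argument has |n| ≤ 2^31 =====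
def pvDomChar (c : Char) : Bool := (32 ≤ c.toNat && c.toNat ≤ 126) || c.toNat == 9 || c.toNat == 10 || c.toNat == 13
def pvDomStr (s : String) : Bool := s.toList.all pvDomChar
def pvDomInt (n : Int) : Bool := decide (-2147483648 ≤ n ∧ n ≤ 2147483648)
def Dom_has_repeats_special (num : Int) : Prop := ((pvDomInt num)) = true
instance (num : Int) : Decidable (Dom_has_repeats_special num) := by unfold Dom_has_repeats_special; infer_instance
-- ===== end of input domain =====

-- B replaces A's prev/num_consec scan with early return by materializing the run-length encoding and testing group lengths (alternative decomposition, same cost).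


-- ===== PORT A =====
-- A: scan str(num) keeping (num_consec, prev); early-return True when a run of exactly 2 closes.
def loopA (cs : List Char) (num_consec : Int) (prev : Option Char) : Bool :=
  match cs with
  | [] => num_consec == 2
  | c :: rest =>
    if some c == prev then loopA rest (num_consec + 1) (some c)
    else if num_consec == 2 then true
    else loopA rest 1 (some c)

def has_repeats_special (num : Int) : Bool :=
  loopA (PySem.Int.toStr num).toList 1 none

-- ===== PORT B =====
-- B: build the run-length encoding (appending at the back, bumping the last run), then test lengths.
def stepB (runs : List (Char × Int)) (ch : Char) : List (Char × Int) :=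
  match runs.getLast? with
  | some (c, n) => if c == ch then runs.dropLast ++ [(c, n + 1)] else runs ++ [(ch, 1)]
  | none => [(ch, 1)]

def has_repeats_special_alt (num : Int) : Bool :=
  ((PySem.Int.toStr num).toList.foldl stepB []).any (fun r => r.2 == 2)

-- ===== PRECONDITION & SPEC =====
def Spec_has_repeats_special (num : Int) (out : Bool) : Prop := out = has_repeats_special_alt num
instance (num : Int) (out : Bool) : Decidable (Spec_has_repeats_special num out) := by unfold Spec_has_repeats_special; infer_instance

-- ===== CLAIM (what is proved, stated in full; the proofs are below) =====
def Claim_equal_has_repeats_special : Prop := ∀ (num : Int), Dom_has_repeats_special num → Spec_has_repeats_special num (has_repeats_special num)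

-- ===== LEMMAS AND PROOFS =====

-- run-length encoding of a list whose current (front) run is (p, n)
def pairRuns (p : Char) (n : Int) : List Char → List (Char × Int)
  | [] => [(p, n)]
  | c :: cs => if c == p then pairRuns p (n + 1) cs else (p, n) :: pairRuns c 1 cs

theorem loopA_pairRuns (cs : List Char) : ∀ (p : Char) (n : Int),
    loopA cs n (some p) = (pairRuns p n cs).any (fun r => r.2 == 2) := by
  induction cs with
  | nil => intro p n; simp [loopA, pairRuns, List.any]
  | cons c cs ih =>
    intro p n
    by_cases h : c = p
    · subst h
      simp [loopA, pairRuns, ih]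
    · have hb : (c == p) = false := by simp [h]
      simp only [loopA, pairRuns, hb]
      rw [if_neg (by simp [h])]
      by_cases h2 : n = 2
      · subst h2; simp
      · have : ((n : Int) == 2) = false := by simp [h2]
        simp [this, ih]

theorem foldl_stepB (cs : List Char) : ∀ (acc : List (Char × Int)) (p : Char) (n : Int),
    List.foldl stepB (acc ++ [(p, n)]) cs = acc ++ pairRuns p n cs := by
  induction cs with
  | nil => intro acc p n; simp [pairRuns]
  | cons c cs ih =>
    intro acc p n
    simp only [List.foldl_cons]
    by_cases h : p = c
    · subst h
      have hs : stepB (acc ++ [(p, n)]) p = acc ++ [(p, n + 1)] := by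
        simp [stepB]
      rw [hs, ih, pairRuns]
      simp
    · have hs : stepB (acc ++ [(p, n)]) c = (acc ++ [(p, n)]) ++ [(c, 1)] := by
        simp [stepB, h]
      rw [hs, ih]
      simp [pairRuns, Ne.symm h]

-- ===== VERDICT (by name: the statement is the Claim_ definition above) =====
theorem has_repeats_special_spec : Claim_equal_has_repeats_special := by
  intro num _
  unfold Spec_has_repeats_special has_repeats_special has_repeats_special_alt
  cases hl : (PySem.Int.toStr num).toList with
  | nil => simp [loopA]
  | cons c cs =>
    have h1 : loopA (c :: cs) 1 none = loopA cs 1 (some c) := by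
      simp [loopA]
    have h2 : List.foldl stepB [] (c :: cs) = pairRuns c 1 cs := by
      have := foldl_stepB cs [] c 1
      simpa [stepB] using this
    rw [h1, h2, loopA_pairRuns]
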